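-- pv_equiv track=rewrite | github.com/Butxer93/data_science_group | data/misc/alerta_mantenimiento.py | generar_alerta_html
-- ===== SOURCE A (Python) =====
-- def generar_alerta_html(kilometraje, meses):
--     """
--     Genera un div HTML con avisos de mantenimiento según kilometraje o tiempo.
--     kilometraje: int -> kilómetros recorridos
--     meses: int -> tiempo desde último mantenimiento en meses
--     """
--
--     alertas = []
--
--     # Grupo corto plazo (10k - 20k km o 6 meses)
--     if kilometraje % 10000 < 1000 or meses >= 6:
--         alertas.append("Cambio de aceite, filtro de aceite, rotación de neumáticos")
--
--     # Grupo medio plazo (30k - 60k km o 2 años)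
--     if kilometraje % 30000 < 1000 or meses >= 24:
--         alertas.append("Filtro de combustible, líquido de frenos, líquido refrigerante, filtro de aire")
--
--     # Grupo largo plazo (80k - 120k km o 5 años)
--     if kilometraje % 80000 < 2000 or meses >= 60:
--         alertas.append("Correa de distribución, amortiguadores, discos de freno")
--
--     # Construcción del div en HTML
--     if alertas:
--         html = f"""
--         <div style='padding:15px; background-color:#ffcccc; border:1px solid #cc0000; border-radius:8px;'>
--             <h3>⚠️ Aviso de mantenimiento</h3>
--             <ul>
--                 {''.join(f"<li>{a}</li>" for a in alertas)}
--             </ul>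
--         </div>
--         """
--     else:
--         html = """
--         <div style='padding:15px; background-color:#ccffcc; border:1px solid #009900; border-radius:8px;'>
--             <h3>✅ Todo en orden</h3>
--             <p>No corresponde mantenimiento por ahora.</p>
--         </div>
--         """
--
--     return html
-- ===== SOURCE B (Python) =====
-- MSGS = [
--     "Cambio de aceite, filtro de aceite, rotaci\u00f3n de neum\u00e1ticos",
--     "Filtro de combustible, l\u00edquido de frenos, l\u00edquido refrigerante, filtro de aire",
--     "Correa de distribuci\u00f3n, amortiguadores, discos de freno",
-- ]
--
-- HEAD_RED = ("\n        <div style='padding:15px; background-color:#ffcccc; "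
--             "border:1px solid #cc0000; border-radius:8px;'>\n"
--             "            <h3>\u26a0\ufe0f Aviso de mantenimiento</h3>\n"
--             "            <ul>\n                ")
-- TAIL_RED = "\n            </ul>\n        </div>\n        "
-- GREEN = ("\n        <div style='padding:15px; background-color:#ccffcc; "
--          "border:1px solid #009900; border-radius:8px;'>\n"
--          "            <h3>\u2705 Todo en orden</h3>\n"
--          "            <p>No corresponde mantenimiento por ahora.</p>\n"
--          "        </div>\n        ")
--
--
-- def _render(mask):
--     sel = [m for i, m in enumerate(MSGS) if (mask >> i) & 1]
--     if not sel:
--         return GREEN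
--     return HEAD_RED + "".join("<li>%s</li>" % s for s in sel) + TAIL_RED
--
--
-- TABLE = [_render(mask) for mask in range(8)]
--
--
-- def generar_alerta_html(kilometraje, meses):
--     mask = ((kilometraje % 10000 < 1000 or meses >= 6)
--             | (kilometraje % 30000 < 1000 or meses >= 24) << 1
--             | (kilometraje % 80000 < 2000 or meses >= 60) << 2)
--     return TABLE[mask]
-- ===== Notes on version B (the rewrite author's own statement) =====
-- stated objective: alternative
-- what changed: Instead of accumulating a list of messages through three branches and joining them at call time, B enumerates all 8 possible rule subsets once at import time into a precomputed output table; the function packs the three conditions into a 3-bit mask and returns TABLE[mask] with no string building at runtime.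
import Mathlib
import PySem

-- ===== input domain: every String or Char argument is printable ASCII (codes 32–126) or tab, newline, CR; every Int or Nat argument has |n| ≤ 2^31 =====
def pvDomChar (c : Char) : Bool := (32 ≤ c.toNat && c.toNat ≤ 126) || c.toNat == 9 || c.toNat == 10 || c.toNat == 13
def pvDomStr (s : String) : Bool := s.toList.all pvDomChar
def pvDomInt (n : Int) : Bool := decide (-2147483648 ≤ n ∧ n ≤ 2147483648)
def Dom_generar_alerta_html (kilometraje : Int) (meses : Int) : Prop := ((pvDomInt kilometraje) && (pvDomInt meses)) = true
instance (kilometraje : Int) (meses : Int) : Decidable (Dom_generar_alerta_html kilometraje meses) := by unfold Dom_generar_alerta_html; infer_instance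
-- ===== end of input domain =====

-- B precomputes the 8 possible HTML outputs (one per subset of triggered rules) into a
-- lookup table and returns TABLE[mask] for a 3-bit condition mask; return value proved identical.

-- ===== PORT A =====
def generar_alerta_html (kilometraje : Int) (meses : Int) : String :=
  let alertas : List String := []
  let alertas := if PySem.Int.mod kilometraje 10000 < 1000 ∨ meses ≥ 6 then
      alertas ++ ["Cambio de aceite, filtro de aceite, rotación de neumáticos"] else alertas
  let alertas := if PySem.Int.mod kilometraje 30000 < 1000 ∨ meses ≥ 24 then
      alertas ++ ["Filtro de combustible, líquido de frenos, líquido refrigerante, filtro de aire"] else alertas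
  let alertas := if PySem.Int.mod kilometraje 80000 < 2000 ∨ meses ≥ 60 then
      alertas ++ ["Correa de distribución, amortiguadores, discos de freno"] else alertas
  if alertas ≠ [] then
    "\n        <div style='padding:15px; background-color:#ffcccc; border:1px solid #cc0000; border-radius:8px;'>\n            <h3>⚠️ Aviso de mantenimiento</h3>\n            <ul>\n                "
      ++ String.join (alertas.map (fun a => "<li>" ++ a ++ "</li>"))
      ++ "\n            </ul>\n        </div>\n        "
  else
    "\n        <div style='padding:15px; background-color:#ccffcc; border:1px solid #009900; border-radius:8px;'>\n            <h3>✅ Todo en orden</h3>\n            <p>No corresponde mantenimiento por ahora.</p>\n        </div>\n        "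

-- ===== PORT B =====
def pvMsgs : List String :=
  ["Cambio de aceite, filtro de aceite, rotación de neumáticos",
   "Filtro de combustible, líquido de frenos, líquido refrigerante, filtro de aire",
   "Correa de distribución, amortiguadores, discos de freno"]

def pvHeadRed : String :=
  "\n        <div style='padding:15px; background-color:#ffcccc; border:1px solid #cc0000; border-radius:8px;'>\n            <h3>⚠️ Aviso de mantenimiento</h3>\n            <ul>\n                "
def pvTailRed : String := "\n            </ul>\n        </div>\n        "
def pvGreen : String :=
  "\n        <div style='padding:15px; background-color:#ccffcc; border:1px solid #009900; border-radius:8px;'>\n            <h3>✅ Todo en orden</h3>\n            <p>No corresponde mantenimiento por ahora.</p>\n        </div>\n        "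

def pvRender (mask : Nat) : String :=
  let sel := (pvMsgs.zipIdx.filter (fun p => (mask >>> p.2) % 2 == 1)).map Prod.fst
  if sel.isEmpty then pvGreen
  else pvHeadRed ++ String.join (sel.map (fun s => "<li>" ++ s ++ "</li>")) ++ pvTailRed

def pvTable : List String := (List.range 8).map pvRender

def generar_alerta_html_alt (kilometraje : Int) (meses : Int) : String :=
  let b0 : Nat := if PySem.Int.mod kilometraje 10000 < 1000 ∨ meses ≥ 6 then 1 else 0
  let b1 : Nat := if PySem.Int.mod kilometraje 30000 < 1000 ∨ meses ≥ 24 then 1 else 0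
  let b2 : Nat := if PySem.Int.mod kilometraje 80000 < 2000 ∨ meses ≥ 60 then 1 else 0
  let mask := b0 ||| (b1 <<< 1) ||| (b2 <<< 2)
  pvTable.getD mask ""

-- ===== PRECONDITION & SPEC =====
def Spec_generar_alerta_html (kilometraje : Int) (meses : Int) (out : String) : Prop := out = generar_alerta_html_alt kilometraje meses
instance (kilometraje : Int) (meses : Int) (out : String) : Decidable (Spec_generar_alerta_html kilometraje meses out) := by unfold Spec_generar_alerta_html; infer_instance

-- ===== CLAIM =====
def Claim_equal_generar_alerta_html : Prop := ∀ (kilometraje : Int) (meses : Int), Dom_generar_alerta_html kilometraje meses → Spec_generar_alerta_html kilometraje meses (generar_alerta_html kilometraje meses)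

-- ===== LEMMAS AND PROOFS =====

-- ===== VERDICT =====
set_option maxHeartbeats 2000000 in
theorem generar_alerta_html_spec : Claim_equal_generar_alerta_html := by
  intro k m _
  unfold Spec_generar_alerta_html generar_alerta_html generar_alerta_html_alt
  by_cases a1 : k % 10000 < 1000 <;>
  by_cases a2 : (6:Int) ≤ m <;>
  by_cases a3 : k % 30000 < 1000 <;>
  by_cases a4 : (24:Int) ≤ m <;>
  by_cases a5 : k % 80000 < 2000 <;>
  by_cases a6 : (60:Int) ≤ m <;>
    simp [a1, a2, a3, a4, a5, a6, pvTable, pvRender, pvMsgs, List.range_succ,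
          List.zipIdx, List.filter, pvHeadRed, pvTailRed, pvGreen, String.join]
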